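-- pv_equiv track=rewrite | github.com/H2WO4/compactProgramming | défis/somme_inverse_impaire.py | check
-- ===== SOURCE A (Python) =====
-- def check(n):
--     chiffres = []
--     inverse = 0
--     j = n
--     while j >= 1:
--         chiffres.append(j % 10)
--         j //= 10
--
--     l = 0
--     for k in chiffres:
--         inverse += k * 10 ** (len(chiffres) - l - 1)
--         l += 1
--     somme = n + inverse
--
--     while somme >= 1:
--         if somme % 2 == 0:
--             return False
--         somme //= 10
--     return True
-- ===== SOURCE B (Python) =====
-- def check(n):
--     def reverse(j, acc):
--         return acc if j < 1 else reverse(j // 10, acc * 10 + j % 10)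
--
--     def all_odd(s):
--         return s < 1 or (s % 2 == 1 and all_odd(s // 10))
--
--     return all_odd(n + reverse(n, 0))
-- ===== Notes on version B (the rewrite author's own statement) =====
-- stated objective: simpler
-- what changed: Replaces A's three imperative passes (build a digit list, re-walk it with an index counter and 10**k positional weights, then an early-return parity loop) by two small tail recursions: a one-pass accumulator reversal (rev = rev*10 + j%10, no list and no powers) and a recursive all-odd digit predicate.
import Mathlib
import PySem

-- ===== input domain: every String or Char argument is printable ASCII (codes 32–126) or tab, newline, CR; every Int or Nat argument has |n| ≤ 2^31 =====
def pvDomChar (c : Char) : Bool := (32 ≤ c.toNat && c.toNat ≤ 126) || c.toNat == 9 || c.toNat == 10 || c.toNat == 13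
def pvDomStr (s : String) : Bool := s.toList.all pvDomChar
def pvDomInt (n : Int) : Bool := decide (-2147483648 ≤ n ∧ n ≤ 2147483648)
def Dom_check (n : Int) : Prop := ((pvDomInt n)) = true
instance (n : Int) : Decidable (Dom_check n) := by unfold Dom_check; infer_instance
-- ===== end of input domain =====

-- B replaces A's digit list + positional 10**k weighted sum + parity loop by two one-pass tail recursions (simpler).

-- termination helper for the digit recursions (cited by the ports' decreasing_by)
theorem pv_div10_lt (j : Int) (h : 1 ≤ j) :
    (PySem.Int.floordiv j 10).toNat < j.toNat := by
  rw [PySem.Int.floordiv_eq_ediv_of_pos (by norm_num)]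
  omega

-- ===== PORT A =====
-- while j >= 1: chiffres.append(j % 10); j //= 10
def checkDigits (j : Int) : List Int :=
  if h : 1 ≤ j then PySem.Int.mod j 10 :: checkDigits (PySem.Int.floordiv j 10) else []
termination_by j.toNat
decreasing_by exact pv_div10_lt j h

-- while somme >= 1: if somme % 2 == 0: return False; somme //= 10 -- then: return True
def checkOddLoop (somme : Int) : Bool :=
  if h : 1 ≤ somme then
    if PySem.Int.mod somme 2 == 0 then false
    else checkOddLoop (PySem.Int.floordiv somme 10)
  else true
termination_by somme.toNat
decreasing_by exact pv_div10_lt somme h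

def check (n : Int) : Bool :=
  let chiffres := checkDigits n
  -- for k in chiffres: inverse += k * 10 ** (len(chiffres) - l - 1); l += 1
  -- (the exponent len - l - 1 is ≥ 0 at every iteration, so the Nat-exponent pow is exact)
  let st := chiffres.foldl
    (fun (st : Int × Int) k =>
      (st.1 + k * 10 ^ (((chiffres.length : Int) - st.2 - 1).toNat), st.2 + 1))
    ((0 : Int), (0 : Int))
  let somme := n + st.1
  checkOddLoop somme

-- ===== PORT B =====
-- return acc if j < 1 else reverse(j // 10, acc * 10 + j % 10)
def checkRevAcc (j : Int) (acc : Int) : Int :=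
  if h : j < 1 then acc
  else checkRevAcc (PySem.Int.floordiv j 10) (acc * 10 + PySem.Int.mod j 10)
termination_by j.toNat
decreasing_by exact pv_div10_lt j (by omega)

-- return s < 1 or (s % 2 == 1 and all_odd(s // 10))
def checkAllOdd (s : Int) : Bool :=
  if h : s < 1 then true
  else (PySem.Int.mod s 2 == 1 && checkAllOdd (PySem.Int.floordiv s 10))
termination_by s.toNat
decreasing_by exact pv_div10_lt s (by omega)

def check_alt (n : Int) : Bool :=
  checkAllOdd (n + checkRevAcc n 0)

-- ===== PRECONDITION & SPEC =====
def Spec_check (n : Int) (out : Bool) : Prop := out = check_alt n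
instance (n : Int) (out : Bool) : Decidable (Spec_check n out) := by unfold Spec_check; infer_instance

-- ===== CLAIM (what is proved, stated in full; the proofs are below) =====
def Claim_equal_check : Prop := ∀ (n : Int), Dom_check n → Spec_check n (check n)

-- ===== LEMMAS AND PROOFS =====

-- weighted sum of a digit list with decreasing powers of 10 (proof-only helper)
def pvWsum : List Int → Int
  | [] => 0
  | d :: rest => d * 10 ^ rest.length + pvWsum rest

-- B's accumulator reversal, characterised through A's digit list
theorem pv_revAcc_eq (j : Int) (acc : Int) :
    checkRevAcc j acc = acc * 10 ^ (checkDigits j).length + pvWsum (checkDigits j) := by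
  induction j, acc using checkRevAcc.induct with
  | case1 j acc h =>
      rw [checkRevAcc, checkDigits]
      simp [h, show ¬ (1 ≤ j) by omega, pvWsum]
  | case2 j acc h ih =>
      rw [checkRevAcc, checkDigits, dif_neg h, dif_pos (show 1 ≤ j by omega), ih]
      simp [pvWsum, List.length_cons]
      ring

-- A's indexed fold computes the same weighted sum
theorem pv_fold_eq (len : Nat) : ∀ (L : List Int) (inv : Int) (l0 : Nat), l0 + L.length = len →
    (L.foldl
      (fun (st : Int × Int) k =>
        (st.1 + k * 10 ^ (((len : Int) - st.2 - 1).toNat), st.2 + 1))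
      (inv, (l0 : Int))) =
    (inv + pvWsum L, (len : Int)) := by
  intro L
  induction L with
  | nil =>
      intro inv l0 h
      simp only [List.length_nil, Nat.add_zero] at h
      subst h
      simp [pvWsum]
  | cons d rest ih =>
      intro inv l0 h
      have h' : l0 + rest.length + 1 = len := by
        simpa [Nat.add_comm, Nat.add_left_comm] using h
      simp only [List.foldl_cons]
      have h1 : ((l0 : Int) + 1) = ((l0 + 1 : Nat) : Int) := by push_cast; ring
      have h2 : (((len : Int) - (l0 : Int) - 1).toNat) = rest.length := by omega
      rw [h2, h1, ih (inv + d * 10 ^ rest.length) (l0 + 1) (by omega)]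
      simp [pvWsum]
      ring

-- A's early-return parity loop is B's recursive all-odd predicate
theorem pv_odd_eq (s : Int) : checkOddLoop s = checkAllOdd s := by
  induction s using checkOddLoop.induct with
  | case1 s h hmod =>
      rw [checkOddLoop, checkAllOdd, dif_pos h, dif_neg (show ¬ s < 1 by omega), if_pos hmod]
      have h0 : PySem.Int.mod s 2 = 0 := by simpa using hmod
      rw [h0]
      simp
  | case2 s h hmod ih =>
      have h2 : PySem.Int.mod s 2 = 1 := by
        have h0 := PySem.Int.mod_nonneg s (b := 2) (by norm_num)
        have h1 := PySem.Int.mod_lt s (b := 2) (by norm_num)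
        have : PySem.Int.mod s 2 ≠ 0 := by simpa using hmod
        omega
      rw [checkOddLoop, checkAllOdd, dif_pos h, dif_neg (show ¬ s < 1 by omega), if_neg hmod,
        ih, h2]
      simp
  | case3 s h =>
      rw [checkOddLoop, checkAllOdd, dif_neg h, dif_pos (show s < 1 by omega)]

-- ===== VERDICT (by name: the statement is the Claim_ definition above) =====
theorem check_spec : Claim_equal_check := by
  intro n _
  unfold Spec_check check check_alt
  dsimp only
  have hf := pv_fold_eq (checkDigits n).length (checkDigits n) 0 0 (by simp)
  have hr := pv_revAcc_eq n 0
  simp only [Nat.cast_zero] at hf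
  rw [hf, pv_odd_eq, hr]
  simp
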